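-- pv_equiv track=rewrite | github.com/lin-tan/knod | src/validation/quixbugs_rerank.py | abstract_patch
-- ===== SOURCE A (Python) =====
-- def abstract_patch(patch):
--     new_patch = []
--     for token in patch.split():
--         tokens = token.split('_')
--         if len(tokens) == 2 and tokens[0] in ['VAR', 'METHOD', 'TYPE', 'STRING', 'CHAR', 'INT', 'FLOAT']:
--             new_patch.append(tokens[0])
--         else:
--             new_patch.append(token)
--     return ' '.join(new_patch)
-- ===== SOURCE B (Python) =====
-- _TYPE_NAMES = ('VAR', 'METHOD', 'TYPE', 'STRING', 'CHAR', 'INT', 'FLOAT')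
--
--
-- def abstract_patch(patch):
--     # Single index-based scan over the raw string: no split()/join(), tokens are
--     # located by hand, the one-underscore test uses find() and slicing, and the
--     # separating spaces are written into the result list directly.
--     res = []
--     i, n = 0, len(patch)
--     while i < n:
--         if patch[i].isspace():
--             i += 1
--         else:
--             j = i + 1
--             while j < n and not patch[j].isspace():
--                 j += 1
--             token = patch[i:j]
--             k = token.find('_')
--             if k != -1 and '_' not in token[k + 1:] and token[:k] in _TYPE_NAMES:
--                 token = token[:k]
--             if res:
--                 res.append(' ')
--             res.append(token)
--             i = j
--     return ''.join(res)
-- ===== Notes on version B (the rewrite author's own statement) =====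
-- stated objective: alternative
-- what changed: B drops A's split()/join() pipeline entirely: it scans the raw string once with explicit indices, locating each token by hand, testing the one-underscore rule with find() and slicing instead of splitting the token into pieces, and writing the separating spaces into the output list directly.
import Mathlib
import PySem

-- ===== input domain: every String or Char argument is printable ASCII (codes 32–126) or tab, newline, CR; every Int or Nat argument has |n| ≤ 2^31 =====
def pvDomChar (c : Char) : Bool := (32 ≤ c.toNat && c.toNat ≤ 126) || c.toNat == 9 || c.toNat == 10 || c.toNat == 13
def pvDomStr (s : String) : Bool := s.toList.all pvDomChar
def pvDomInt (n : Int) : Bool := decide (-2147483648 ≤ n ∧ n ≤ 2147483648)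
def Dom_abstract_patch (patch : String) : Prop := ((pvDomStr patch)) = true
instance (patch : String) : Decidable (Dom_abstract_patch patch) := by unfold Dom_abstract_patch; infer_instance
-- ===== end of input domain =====

-- B replaces A's split/join pipeline by a single index-based scan of the raw string (tokens found by hand,
-- one-underscore test via find and slicing, separators written directly); alternative decomposition, same cost.
-- Equivalence proved on all inputs.

-- ===== PORT A =====
-- the literal list ['VAR', 'METHOD', ...] from A's membership test
def aTypes : List (List Char) := ["VAR".toList, "METHOD".toList, "TYPE".toList, "STRING".toList, "CHAR".toList, "INT".toList, "FLOAT".toList]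

-- body of A's loop for one token: split on '_', keep the head if exactly two parts and the head is a type name
-- (tokens[0] is read as headI: split never returns an empty list, so this is Python-exact)
def aTok (token : List Char) : List Char :=
  let tokens := PySem.Chars.splitOn token ['_']
  if tokens.length == 2 && aTypes.contains tokens.headI then tokens.headI else token

def abstract_patch (patch : String) : String :=
  String.ofList (PySem.Chars.join [' ']
    ((PySem.Chars.split₀ patch.toList).foldl (fun acc token => acc ++ [aTok token]) []))

-- ===== PORT B =====
def bTypes : List (List Char) := ["VAR".toList, "METHOD".toList, "TYPE".toList, "STRING".toList, "CHAR".toList, "INT".toList, "FLOAT".toList]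

-- B's per-token body: k = token.find('_'); if k != -1 and '_' not in token[k+1:] and token[:k] in _TYPE_NAMES: token = token[:k]
def bProc (token : List Char) : List Char :=
  let k := PySem.Chars.find token ['_']
  if (k != -1)
      && !(PySem.Chars.isIn ['_'] (PySem.List.slice token (some (k + 1)) none))
      && bTypes.contains (PySem.List.slice token none (some k))
  then PySem.List.slice token none (some k) else token

-- B's outer while-loop: i skipping spaces, j spanning the token (takeWhile/dropWhile is the j-advance),
-- appending ' ' first when res is already nonempty; the remaining suffix plays the role of the index i
def bLoop : List Char → List (List Char) → List (List Char)
  | [], res => res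
  | c :: cs, res =>
    if PySem.Chars.isspace c then bLoop cs res
    else
      let tok := bProc ((c :: cs).takeWhile (fun d => !PySem.Chars.isspace d))
      bLoop ((c :: cs).dropWhile (fun d => !PySem.Chars.isspace d))
        (res ++ if res.isEmpty then [tok] else [[' '], tok])
  termination_by cs _ => cs.length
  decreasing_by
    · simp
    · simp only [List.dropWhile_cons, Bool.not_eq_eq_eq_not, Bool.not_true, *]
      simp only [if_true, List.length_cons]
      exact Nat.lt_succ_of_le (List.length_dropWhile_le _ _)

-- ''.join(res)
def abstract_patch_alt (patch : String) : String :=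
  String.ofList (PySem.Chars.join [] (bLoop patch.toList []))

-- ===== PRECONDITION & SPEC =====
def Spec_abstract_patch (patch : String) (out : String) : Prop := out = abstract_patch_alt patch
instance (patch : String) (out : String) : Decidable (Spec_abstract_patch patch out) := by unfold Spec_abstract_patch; infer_instance

-- ===== CLAIM (what is proved, stated in full; the proofs are below) =====
def Claim_equal_abstract_patch : Prop := ∀ (patch : String), Dom_abstract_patch patch → Spec_abstract_patch patch (abstract_patch patch)

-- ===== LEMMAS AND PROOFS =====

-- reference model of token.split('_')
def mySplit : List Char → List (List Char)
  | [] => [[]]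
  | c :: cs => if c = '_' then [] :: mySplit cs else (mySplit cs).modifyHead (c :: ·)

theorem mySplit_ne_nil (cs : List Char) : mySplit cs ≠ [] := by
  induction cs with
  | nil => simp [mySplit]
  | cons c cs ih =>
    simp only [mySplit]
    split
    · simp
    · cases h : mySplit cs with
      | nil => exact absurd h ih
      | cons a t => simp [List.modifyHead]

theorem go_spec (l : List Char) : ∀ (fuel : Nat) (cur : List Char) (acc : List (List Char)),
    l.length ≤ fuel →
    PySem.Chars.splitOn.go ['_'] fuel l cur acc =
      acc.reverse ++ (cur.reverse ++ (mySplit l).headI) :: (mySplit l).tail := by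
  induction l with
  | nil =>
    intro fuel cur acc _
    cases fuel <;> simp [PySem.Chars.splitOn.go, mySplit]
  | cons c cs ih =>
    intro fuel cur acc hf
    cases fuel with
    | zero => simp at hf
    | succ f =>
      by_cases hc : c = '_'
      · subst hc
        have hpre : List.isPrefixOf ['_'] ('_' :: cs) = true := by simp [List.isPrefixOf]
        rw [PySem.Chars.splitOn.go, if_pos hpre]
        have : List.drop (List.length ['_']) ('_' :: cs) = cs := by simp
        rw [this, ih f [] (cur.reverse :: acc) (by simpa using Nat.lt_succ_iff.mp (by simpa using hf))]
        cases h : mySplit cs with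
        | nil => exact absurd h (mySplit_ne_nil cs)
        | cons a t => simp [mySplit, h]
      · have hpre : List.isPrefixOf ['_'] (c :: cs) = false := by
          simp [List.isPrefixOf]
          exact fun h => absurd h.symm hc
        rw [PySem.Chars.splitOn.go, if_neg (by simp [hpre])]
        rw [ih f (c :: cur) acc (by simpa using Nat.lt_succ_iff.mp (by simpa using hf))]
        cases h : mySplit cs with
        | nil => exact absurd h (mySplit_ne_nil cs)
        | cons a t => simp [mySplit, h, if_neg hc, List.modifyHead]

theorem splitOn_eq_mySplit (cs : List Char) : PySem.Chars.splitOn cs ['_'] = mySplit cs := by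
  rw [PySem.Chars.splitOn, go_spec cs (cs.length + 1) [] [] (Nat.le_succ _)]
  cases h : mySplit cs with
  | nil => exact absurd h (mySplit_ne_nil cs)
  | cons a t => simp

-- every piece of mySplit cs is underscore-free
theorem mySplit_no_us (cs : List Char) : ∀ piece ∈ mySplit cs, '_' ∉ piece := by
  induction cs with
  | nil => simp [mySplit]
  | cons c cs ih =>
    simp only [mySplit]
    split
    · intro piece hp
      rcases List.mem_cons.mp hp with h | h
      · simp [h]
      · exact ih piece h
    · rename_i hc
      cases h : mySplit cs with
      | nil => exact absurd h (mySplit_ne_nil cs)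
      | cons a t =>
        intro piece hp
        rcases List.mem_cons.mp (by simpa [List.modifyHead, h] using hp) with h' | h'
        · subst h'
          intro hm
          rcases List.mem_cons.mp hm with h'' | h''
          · exact hc h''.symm
          · exact ih a (h ▸ List.mem_cons_self) h''
        · exact ih piece (h ▸ List.mem_cons_of_mem a h')

-- a token with no underscore splits to itself
theorem mySplit_of_no_us (cs : List Char) (h : '_' ∉ cs) : mySplit cs = [cs] := by
  induction cs with
  | nil => rfl
  | cons c cs ih =>
    simp only [mySplit]
    rw [if_neg (by rintro rfl; exact h List.mem_cons_self), ih (fun hm => h (List.mem_cons_of_mem c hm))]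
    rfl

theorem mySplit_singleton (cs a : List Char) (h : mySplit cs = [a]) : cs = a := by
  induction cs generalizing a with
  | nil => simpa [mySplit] using h.symm
  | cons c cs ih =>
    simp only [mySplit] at h
    split at h
    · rename_i hc
      obtain ⟨rfl, h2⟩ := by simpa using h
      exact absurd h2 (mySplit_ne_nil cs)
    · cases hm : mySplit cs with
      | nil => exact absurd hm (mySplit_ne_nil cs)
      | cons x t =>
        rw [hm] at h
        simp [List.modifyHead] at h
        obtain ⟨h1, h2⟩ := h
        have := ih x (by rw [hm, h2])
        simp [← h1, this]

-- splitting at the first underscore: the head piece comes off whole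
theorem mySplit_append_us (p t : List Char) (hp : '_' ∉ p) :
    mySplit (p ++ '_' :: t) = p :: mySplit t := by
  induction p with
  | nil =>
    cases h : mySplit t with
    | nil => exact absurd h (mySplit_ne_nil t)
    | cons a l => simp [mySplit, h]
  | cons c p ih =>
    have hc : c ≠ '_' := by rintro rfl; exact hp List.mem_cons_self
    simp only [List.cons_append, mySplit]
    rw [if_neg hc, ih (fun h => hp (List.mem_cons_of_mem c h))]
    rfl

-- singleton-needle containment is membership
theorem isIn_singleton (t : List Char) : PySem.Chars.isIn ['_'] t = true ↔ '_' ∈ t := by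
  rw [PySem.Chars.isIn_iff_infix]
  constructor
  · intro h; exact h.mem List.mem_cons_self
  · intro h
    obtain ⟨s, u, rfl⟩ := List.append_of_mem h
    exact ⟨s, u, by simp⟩

theorem find_singleton_neg_one (t : List Char) :
    PySem.Chars.find t ['_'] = -1 ↔ '_' ∉ t := by
  rw [PySem.Chars.find_eq_neg_one_iff]
  constructor
  · intro h hm
    obtain ⟨s, u, rfl⟩ := List.append_of_mem hm
    exact h ⟨s, u, by simp⟩
  · intro h hin
    exact h (hin.mem List.mem_cons_self)

-- the decomposition of a token at its first underscore (k = find token '_', 0 ≤ k)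
theorem find_decomp (token : List Char) (h : 0 ≤ PySem.Chars.find token ['_']) :
    token = token.take (PySem.Chars.find token ['_']).toNat ++
      '_' :: token.drop ((PySem.Chars.find token ['_']).toNat + 1) ∧
    '_' ∉ token.take (PySem.Chars.find token ['_']).toNat := by
  obtain ⟨hpre, hmin⟩ := PySem.Chars.find_spec (s := token) (sub := ['_']) h
  set k := (PySem.Chars.find token ['_']).toNat with hk
  obtain ⟨rest, hrest⟩ := hpre
  have hklen : k ≤ token.length := by
    have := PySem.Chars.find_le_length (s := token) (sub := ['_'])
    omega
  have hdropk : token.drop k = '_' :: token.drop (k + 1) := by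
    have hr : rest = List.drop (k + 1) token := by
      simpa [List.drop_drop] using (congrArg (List.drop 1) hrest)
    rw [← hrest, hr]
    rfl
  constructor
  · conv_lhs => rw [← List.take_append_drop k token]
    rw [hdropk]
  · intro hm
    obtain ⟨i, hi, hgi⟩ := List.mem_iff_getElem.mp hm
    have hik : i < k := by
      have := hi; simp at this; omega
    have hilen : i < token.length := lt_of_lt_of_le hik hklen
    apply hmin i hik
    rw [List.drop_eq_getElem_cons hilen]
    refine ⟨token.drop (i + 1), ?_⟩
    have hgi' : token[i] = '_' := by
      have := hgi; simp [List.getElem_take] at this; exact this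
    simp [hgi']

-- B's per-token body equals A's
theorem tok_eq (token : List Char) : aTok token = bProc token := by
  rw [aTok, bProc]
  simp only [splitOn_eq_mySplit]
  by_cases hneg : PySem.Chars.find token ['_'] = -1
  · -- no underscore: both leave the token alone
    have hnm : '_' ∉ token := (find_singleton_neg_one token).mp hneg
    rw [mySplit_of_no_us token hnm]
    simp [hneg]
  · have hpos : 0 ≤ PySem.Chars.find token ['_'] := by
      rcases (PySem.Chars.neg_one_le_find (s := token) (sub := ['_'])).lt_or_eq with h | h
      · omega
      · exact absurd h.symm hneg
    obtain ⟨hdec, hp⟩ := find_decomp token hpos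
    set k := PySem.Chars.find token ['_'] with hkdef
    have hk1 : (0:Int) ≤ k + 1 := by omega
    have hto : PySem.List.slice token none (some k) = token.take k.toNat :=
      PySem.List.slice_to token hpos
    have hfrom : PySem.List.slice token (some (k + 1)) none = token.drop (k + 1).toNat :=
      PySem.List.slice_from token hk1
    have htn : (k + 1).toNat = k.toNat + 1 := by omega
    rw [hto, hfrom, htn]
    set p := token.take k.toNat
    set t := token.drop (k.toNat + 1)
    have hsplit : mySplit token = p :: mySplit t := by
      conv_lhs => rw [hdec]
      exact mySplit_append_us p t hp
    rw [hsplit]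
    have hkne : (k != -1) = true := by simpa using hneg
    rw [hkne]
    by_cases ht : '_' ∈ t
    · -- a second underscore: both leave the token alone
      have hIt : PySem.Chars.isIn ['_'] t = true := (isIn_singleton t).mpr ht
      have hlenf : ((p :: mySplit t).length == 2) = false := by
        cases hm : mySplit t with
        | nil => exact absurd hm (mySplit_ne_nil t)
        | cons a l =>
          cases l with
          | nil =>
            exact absurd ((mySplit_singleton t a hm) ▸ ht)
              (mySplit_no_us t a (hm ▸ List.mem_cons_self))
          | cons b l' => simp
      have hlen1 : (mySplit t).length ≠ 1 := by
        cases hm : mySplit t with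
        | nil => exact absurd hm (mySplit_ne_nil t)
        | cons a l =>
          cases l with
          | nil =>
            exact absurd ((mySplit_singleton t a hm) ▸ ht)
              (mySplit_no_us t a (hm ▸ List.mem_cons_self))
          | cons b l' => simp
      simp [hIt]
      exact fun h _ => absurd h hlen1
    · have hI : PySem.Chars.isIn ['_'] t = false := by
        cases h : PySem.Chars.isIn ['_'] t
        · rfl
        · exact absurd ((isIn_singleton t).mp h) ht
      have hmt : mySplit t = [t] := mySplit_of_no_us t ht
      rw [hmt, hI]
      simp only [Bool.not_false, Bool.and_true, List.length_cons, List.headI_cons]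
      have : aTypes = bTypes := rfl
      rw [this]
      rfl

-- reference model of B's tokenization (= Python's str.split())
def words : List Char → List (List Char)
  | [] => []
  | c :: cs =>
    if PySem.Chars.isspace c then words cs
    else ((c :: cs).takeWhile (fun d => !PySem.Chars.isspace d)) ::
         words ((c :: cs).dropWhile (fun d => !PySem.Chars.isspace d))
  termination_by cs => cs.length
  decreasing_by
    · simp
    · simp only [List.dropWhile_cons, Bool.not_eq_eq_eq_not, Bool.not_true, *]
      simp only [if_true, List.length_cons]
      exact Nat.lt_succ_of_le (List.length_dropWhile_le _ _)

-- partial-word form of words, matching split₀.go's accumulator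
def wordsWith : List Char → List Char → List (List Char)
  | pre, [] => if pre.isEmpty then [] else [pre]
  | pre, c :: cs =>
    if PySem.Chars.isspace c then
      (if pre.isEmpty then wordsWith [] cs else pre :: wordsWith [] cs)
    else wordsWith (pre ++ [c]) cs
  termination_by _ cs => cs.length

theorem wordsWith_spec (cs : List Char) : ∀ pre,
    wordsWith pre cs =
      if pre.isEmpty then words cs
      else (pre ++ cs.takeWhile (fun d => !PySem.Chars.isspace d)) ::
           words (cs.dropWhile (fun d => !PySem.Chars.isspace d)) := by
  induction cs with
  | nil =>
    intro pre
    by_cases h : pre.isEmpty <;> simp [wordsWith, words, h]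
  | cons c cs ih =>
    intro pre
    by_cases hc : PySem.Chars.isspace c = true
    · have h0 : wordsWith [] cs = words cs := by rw [ih []]; simp
      have hw : words (c :: cs) = words cs := by rw [words.eq_def]; simp [hc]
      rw [wordsWith, if_pos hc, h0]
      by_cases hp : pre.isEmpty
      · simp [hp, hw]
      · simp [hp, hc, hw]
    · have hcb : (!PySem.Chars.isspace c) = true := by simp [hc]
      rw [wordsWith, if_neg hc, ih (pre ++ [c])]
      simp only [List.takeWhile_cons, List.dropWhile_cons, hcb, if_true]
      rw [words.eq_def]
      simp
      intro hpre
      subst hpre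
      have hw2 : words (c :: cs) = ((c :: cs).takeWhile (fun d => !PySem.Chars.isspace d)) ::
          words ((c :: cs).dropWhile (fun d => !PySem.Chars.isspace d)) := by
        rw [words.eq_def]; simp [hc]
      rw [hw2]
      simp [hcb]

theorem split₀_go_spec (cs : List Char) : ∀ (cur : List Char) (acc : List (List Char)),
    PySem.Chars.split₀.go cs cur acc = acc.reverse ++ wordsWith cur.reverse cs := by
  induction cs with
  | nil =>
    intro cur acc
    rw [PySem.Chars.split₀.go, wordsWith]
    split
    · rename_i h
      simp_all
    · rename_i h
      simp_all
  | cons c cs ih =>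
    intro cur acc
    rw [PySem.Chars.split₀.go, wordsWith]
    by_cases hc : PySem.Chars.isspace c = true
    · simp only [hc, if_true]
      by_cases hcur : cur.isEmpty
      · rw [if_pos hcur, if_pos (by simp_all), ih]
        simp
      · rw [if_neg hcur, if_neg (by simp_all), ih]
        simp_all
    · simp only [hc, Bool.false_eq_true, if_false]
      rw [ih (c :: cur) acc]
      simp

theorem split₀_eq_words (cs : List Char) : PySem.Chars.split₀ cs = words cs := by
  rw [PySem.Chars.split₀, split₀_go_spec cs [] [], wordsWith_spec]
  simp

-- flattened shapes of B's res list
def sepa (ts : List (List Char)) : List (List Char) := ts.flatMap (fun t => [[' '], t])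

def seph : List (List Char) → List (List Char)
  | [] => []
  | t :: ts => t :: sepa ts

theorem bLoop_spec (cs : List Char) (res : List (List Char)) :
    bLoop cs res =
      res ++ (if res.isEmpty then seph ((words cs).map bProc) else sepa ((words cs).map bProc)) := by
  induction cs, res using bLoop.induct with
  | case1 res => simp [bLoop, words, seph, sepa]
  | case2 c cs res hc ih =>
    rw [bLoop, if_pos hc, ih]
    have hw : words (c :: cs) = words cs := by rw [words.eq_def]; simp [hc]
    rw [hw]
  | case3 c cs res hc tok ih =>
    rw [bLoop, if_neg hc]
    refine Eq.trans ih ?_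
    have htok : tok = bProc ((c :: cs).takeWhile (fun d => !PySem.Chars.isspace d)) := rfl
    have hw : words (c :: cs) = ((c :: cs).takeWhile (fun d => !PySem.Chars.isspace d)) ::
        words ((c :: cs).dropWhile (fun d => !PySem.Chars.isspace d)) := by
      rw [words.eq_def]; simp [hc]
    rw [hw]
    by_cases hres : res.isEmpty
    · have hres' : res = [] := by simpa using hres
      subst hres'
      simp [seph, sepa, htok]
    · simp [hres, sepa, htok]

-- ''.join(seph ts) is ' '.join(ts)
theorem join_seph (ts : List (List Char)) :
    PySem.Chars.join [] (seph ts) = PySem.Chars.join [' '] ts := by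
  cases ts with
  | nil => rfl
  | cons t ts =>
    induction ts generalizing t with
    | nil => rfl
    | cons u ts ih =>
      show PySem.Chars.join [] (t :: [' '] :: u :: sepa ts) = _
      rw [PySem.Chars.join_cons_cons, PySem.Chars.join_cons_cons,
        PySem.Chars.join_cons_cons (sep := [' '])]
      have := ih u
      show t ++ [] ++ ([' '] ++ [] ++ PySem.Chars.join [] (u :: sepa ts)) =
        t ++ [' '] ++ PySem.Chars.join [' '] (u :: ts)
      rw [show PySem.Chars.join [] (u :: sepa ts) = PySem.Chars.join [' '] (u :: ts) from ih u]
      simp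

-- ===== VERDICT (by name: the statement is the Claim_ definition above) =====
theorem abstract_patch_spec : Claim_equal_abstract_patch := by
  intro patch _
  unfold Spec_abstract_patch abstract_patch abstract_patch_alt
  rw [PySem.List.foldl_append_singleton_eq_map, List.nil_append,
    bLoop_spec patch.toList []]
  simp only [List.isEmpty_nil, if_true, List.nil_append]
  rw [join_seph, split₀_eq_words, List.map_congr_left (fun token _ => tok_eq token)]
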